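-- pv_equiv track=rewrite | github.com/GundalaNikhil/DSA | dsa-problems/Queues/testcases/tc_generators/generate_que014.py | solve
-- ===== SOURCE A (Python) =====
-- def solve(values):
--     n = len(values)
--     l, r = 0, n - 1
--     res = []
--     turn = 0
--     while l <= r:
--         if turn % 2 == 0:
--             res.append(values[l])
--             l += 1
--         else:
--             res.append(values[r])
--             r -= 1
--         turn += 1
--     return res
-- ===== SOURCE B (Python) =====
-- def solve(values):
--     m = (len(values) + 1) // 2
--     front = values[:m]
--     back = values[m:][::-1]
--     res = []
--     for x, y in zip(front, back):
--         res.append(x)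
--         res.append(y)
--     if len(front) > len(back):
--         res.append(front[-1])
--     return res
-- ===== Notes on version B (the rewrite author's own statement) =====
-- stated objective: alternative
-- what changed: B precomputes the two halves (ceil split, back half reversed) with slicing and zips them into the result in one pass, instead of A's two-pointer while loop walking inward with a turn counter.
import Mathlib
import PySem

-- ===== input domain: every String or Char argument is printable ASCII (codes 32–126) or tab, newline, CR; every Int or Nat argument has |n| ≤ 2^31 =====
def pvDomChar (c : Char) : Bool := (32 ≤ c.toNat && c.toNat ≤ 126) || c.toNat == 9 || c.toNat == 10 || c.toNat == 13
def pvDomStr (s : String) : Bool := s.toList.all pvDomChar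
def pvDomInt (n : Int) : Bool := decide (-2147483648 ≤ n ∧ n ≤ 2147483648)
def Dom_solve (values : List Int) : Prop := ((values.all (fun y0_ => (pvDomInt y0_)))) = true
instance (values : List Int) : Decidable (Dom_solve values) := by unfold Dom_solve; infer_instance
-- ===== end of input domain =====

-- B builds the ceil-split front half and the reversed back half first, then zips them together
-- in one pass; A instead walks two pointers inward alternating on a turn counter. Alternative
-- decomposition, same O(n) cost.

-- ===== PORT A =====
-- A's while loop; fuel = values.length makes the recursion structural (the loop runs r-l+1 ≤ len times);
-- indices stay in range whenever the body runs, so getD 0 is never taken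
def solveLoop (values : List Int) : Nat → Int → Int → Nat → List Int → List Int
  | 0, _, _, _, res => res
  | fuel + 1, l, r, turn, res =>
    if l ≤ r then
      if turn % 2 == 0 then
        solveLoop values fuel (l + 1) r (turn + 1) (res ++ [(PySem.List.pyGet? values l).getD 0])
      else
        solveLoop values fuel l (r - 1) (turn + 1) (res ++ [(PySem.List.pyGet? values r).getD 0])
    else res

def solve (values : List Int) : List Int :=
  solveLoop values values.length 0 ((values.length : Int) - 1) 0 []


-- ===== PORT B =====
def solve_alt (values : List Int) : List Int :=
  let m : Nat := (values.length + 1) / 2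
  let front := values.take m
  let back := (values.drop m).reverse
  let res := (front.zip back).foldl (fun res p => res ++ [p.1, p.2]) []
  if back.length < front.length then res ++ [(PySem.List.pyGet? front (-1)).getD 0] else res

-- ===== PRECONDITION & SPEC =====
def Spec_solve (values : List Int) (out : List Int) : Prop := out = solve_alt values
instance (values : List Int) (out : List Int) : Decidable (Spec_solve values out) := by unfold Spec_solve; infer_instance

-- ===== CLAIM (what is proved, stated in full; the proofs are below) =====
def Claim_equal_solve : Prop := ∀ (values : List Int), Dom_solve values → Spec_solve values (solve values)

-- ===== LEMMAS AND PROOFS =====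

theorem solveLoop_acc (values : List Int) :
    ∀ (fuel : Nat) (l r : Int) (turn : Nat) (res : List Int),
    solveLoop values fuel l r turn res = res ++ solveLoop values fuel l r turn [] := by
  intro fuel
  induction fuel with
  | zero => intro l r turn res; simp [solveLoop]
  | succ fuel ih =>
    intro l r turn res
    simp only [solveLoop]
    by_cases hlr : l ≤ r
    · simp only [if_pos hlr]
      by_cases ht : (turn % 2 == 0) = true
      · simp only [ht, if_pos]
        rw [ih (l+1) r, ih (l+1) r (turn+1) ([] ++ _)]
        simp
      · simp only [Bool.not_eq_true] at ht
        simp only [ht, Bool.false_eq_true, if_false]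
        rw [ih l (r-1), ih l (r-1) (turn+1) ([] ++ _)]
        simp
    · simp [hlr]

theorem solveLoop_parity (values : List Int) :
    ∀ (fuel : Nat) (l r : Int) (t₁ t₂ : Nat) (res : List Int), t₁ % 2 = t₂ % 2 →
    solveLoop values fuel l r t₁ res = solveLoop values fuel l r t₂ res := by
  intro fuel
  induction fuel with
  | zero => intro l r t₁ t₂ res _; rfl
  | succ fuel ih =>
    intro l r t₁ t₂ res hp
    simp only [solveLoop, hp]
    by_cases hlr : l ≤ r
    · simp only [if_pos hlr]
      by_cases ht : (t₂ % 2 == 0) = true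
      · simp only [ht, if_pos]
        exact ih (l+1) r _ _ _ (by omega)
      · simp only [Bool.not_eq_true] at ht
        simp only [ht, Bool.false_eq_true, if_false]
        exact ih l (r-1) _ _ _ (by omega)
    · simp [hlr]

theorem pyGet?_shift (x y : Int) (ys : List Int) (i : Int) (h0 : 0 ≤ i) (h1 : i < (ys.length : Int)) :
    PySem.List.pyGet? (x :: (ys ++ [y])) (i + 1) = PySem.List.pyGet? ys i := by
  rw [PySem.List.pyGet?_of_nonneg _ (by omega : (0:Int) ≤ i + 1), PySem.List.pyGet?_of_nonneg _ h0]
  rw [show (i + 1).toNat = i.toNat + 1 from by omega]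
  simp only [List.getElem?_cons_succ]
  rw [List.getElem?_append_left (by omega)]

theorem solveLoop_shift (x y : Int) (ys : List Int) :
    ∀ (fuel : Nat) (l r : Int), 0 ≤ l → r < (ys.length : Int) →
    ∀ (turn : Nat) (res : List Int),
    solveLoop (x :: (ys ++ [y])) fuel (l + 1) (r + 1) turn res = solveLoop ys fuel l r turn res := by
  intro fuel
  induction fuel with
  | zero => intro l r _ _ turn res; rfl
  | succ fuel ih =>
    intro l r hl hr turn res
    simp only [solveLoop]
    rw [if_congr (by omega : (l + 1 ≤ r + 1) ↔ (l ≤ r)) rfl rfl]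
    by_cases hlr : l ≤ r
    · simp only [if_pos hlr]
      by_cases ht : (turn % 2 == 0) = true
      · simp only [ht, if_pos]
        rw [pyGet?_shift x y ys l hl (by omega),
            show l + 1 + 1 = (l + 1) + 1 from by ring,
            ih (l+1) r (by omega) hr]
      · simp only [Bool.not_eq_true] at ht
        simp only [ht, Bool.false_eq_true, if_false]
        rw [pyGet?_shift x y ys r (by omega) hr,
            show r + 1 - 1 = (r - 1) + 1 from by ring,
            ih l (r-1) hl (by omega)]
    · simp [hlr]

theorem solve_nil : solve [] = [] := rfl

theorem solve_single (x : Int) : solve [x] = [x] := by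
  norm_num [solve, solveLoop]

theorem solve_step (x y : Int) (ys : List Int) :
    solve (x :: (ys ++ [y])) = x :: y :: solve ys := by
  rw [solve, show (x :: (ys ++ [y])).length = ys.length + 1 + 1 from by simp,
      show ((ys.length + 1 + 1 : Nat) : Int) - 1 = (ys.length : Int) + 1 from by push_cast; ring]
  simp only [solveLoop]
  rw [if_pos (by omega : (0:Int) ≤ (ys.length : Int) + 1)]
  norm_num
  rw [show (1:Int) = 0 + 1 from by ring,
      show (ys.length : Int) = ((ys.length : Int) - 1) + 1 from by ring,
      solveLoop_shift x y ys ys.length 0 ((ys.length : Int) - 1) (le_refl 0) (by omega),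
      solveLoop_parity ys ys.length 0 _ 2 0 _ (by norm_num),
      solveLoop_acc, solve]
  simp

theorem solve_alt_nil : solve_alt [] = [] := by simp [solve_alt]

theorem solve_alt_single (x : Int) : solve_alt [x] = [x] := by
  simp [solve_alt, PySem.List.pyGet?_neg_one]

theorem solve_alt_step (x y : Int) (ys : List Int) :
    solve_alt (x :: (ys ++ [y])) = x :: y :: solve_alt ys := by
  simp only [solve_alt]
  set k := ys.length with hkdef
  have hm : ((x :: (ys ++ [y])).length + 1) / 2 = (k + 1) / 2 + 1 := by
    simp [hkdef]; omega
  set m' := (k + 1) / 2 with hm'def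
  have hm'le : m' ≤ k := by omega
  rw [hm]
  have htake : (x :: (ys ++ [y])).take (m' + 1) = x :: ys.take m' := by
    rw [List.take_cons (by omega)]
    simp [List.take_append_of_le_length hm'le]
  have hdrop : (x :: (ys ++ [y])).drop (m' + 1) = ys.drop m' ++ [y] := by
    rw [show m' + 1 = 1 + m' from by omega, ← List.drop_drop, List.drop_one, List.tail_cons,
        List.drop_append_of_le_length hm'le]
  rw [htake, hdrop, List.reverse_append, List.reverse_singleton, List.singleton_append,
      List.zip_cons_cons, List.foldl_cons,
      PySem.List.foldl_append_eq_flatMap, PySem.List.foldl_append_eq_flatMap]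
  have hlen_take : (List.take m' ys).length = m' := by simp; omega
  have hlen_drop : (List.drop m' ys).length = k - m' := by simp [hkdef]
  by_cases hc : k - m' < m'
  · rw [if_pos (by simp only [List.length_cons, List.length_reverse, hlen_take, hlen_drop]; omega),
        if_pos (by simp only [List.length_reverse, hlen_take, hlen_drop]; omega)]
    have hne : List.take m' ys ≠ [] := by
      intro h
      rw [h] at hlen_take
      simp at hlen_take
      omega
    obtain ⟨f, fs, hF⟩ := List.exists_cons_of_ne_nil hne
    rw [hF]
    simp [PySem.List.pyGet?_neg_one]
  · rw [if_neg (by simp only [List.length_cons, List.length_reverse, hlen_take, hlen_drop]; omega),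
        if_neg (by simp only [List.length_reverse, hlen_take, hlen_drop]; omega)]
    simp

theorem solve_eq_alt (values : List Int) : solve values = solve_alt values := by
  induction values using List.bidirectionalRec with
  | nil => rw [solve_nil, solve_alt_nil]
  | singleton x => rw [solve_single, solve_alt_single]
  | cons_append x ys y ih => rw [solve_step, solve_alt_step, ih]

-- ===== VERDICT (by name: the statement is the Claim_ definition above) =====
theorem solve_spec : Claim_equal_solve := by
  intro values _
  unfold Spec_solve
  exact solve_eq_alt values
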